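-- pv_equiv track=rewrite | github.com/tao3k/xiuxian-artisan-workshop | scripts/channel/discord_ingress_stress_runtime_rounds_log_stats.py | collect_log_stats
-- ===== SOURCE A (Python) =====
-- def collect_log_stats(lines: list[str]) -> dict[str, int]:
--     """Extract queue-pressure and parse counters from log lines."""
--
--     def _count(token: str) -> int:
--         return sum(1 for line in lines if token in line)
--
--     return {
--         "parsed_messages": _count("discord ingress parsed message"),
--         "queue_wait_events": _count('event="discord.ingress.inbound_queue_wait"'),
--         "foreground_gate_wait_events": _count('event="discord.foreground.gate_wait"'),
--         "inbound_queue_unavailable_events": _count("discord inbound queue unavailable"),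
--     }
-- ===== SOURCE B (Python) =====
-- def collect_log_stats(lines: list[str]) -> dict[str, int]:
--     """Single fused pass: test every line against all four tokens once."""
--     parsed = waits = gate = unavail = 0
--     for line in lines:
--         if "discord ingress parsed message" in line:
--             parsed += 1
--         if 'event="discord.ingress.inbound_queue_wait"' in line:
--             waits += 1
--         if 'event="discord.foreground.gate_wait"' in line:
--             gate += 1
--         if "discord inbound queue unavailable" in line:
--             unavail += 1
--     return {
--         "parsed_messages": parsed,
--         "queue_wait_events": waits,
--         "foreground_gate_wait_events": gate,
--         "inbound_queue_unavailable_events": unavail,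
--     }
-- ===== Notes on version B (the rewrite author's own statement) =====
-- stated objective: alternative
-- what changed: A scans the whole line list four times, once per token; B makes a single fused pass over the lines, testing each line against all four tokens and maintaining four counters.
import Mathlib
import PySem

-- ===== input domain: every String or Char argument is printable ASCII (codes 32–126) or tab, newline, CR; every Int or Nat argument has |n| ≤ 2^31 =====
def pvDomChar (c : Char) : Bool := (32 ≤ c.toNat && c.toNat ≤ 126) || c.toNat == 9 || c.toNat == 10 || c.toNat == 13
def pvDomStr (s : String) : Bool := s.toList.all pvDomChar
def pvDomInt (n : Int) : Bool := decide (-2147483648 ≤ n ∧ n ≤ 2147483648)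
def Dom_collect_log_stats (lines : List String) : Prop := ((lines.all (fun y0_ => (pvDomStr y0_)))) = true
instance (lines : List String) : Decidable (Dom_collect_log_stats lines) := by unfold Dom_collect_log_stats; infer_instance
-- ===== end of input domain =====

-- ===== PORT A =====
-- B fuses A's four per-token list scans into one pass maintaining four counters (alternative decomposition).
def pvCount (lines : List String) (token : String) : Int :=
  lines.foldl (fun acc line => if PySem.Str.isIn token line then acc + 1 else acc) 0

def collect_log_stats (lines : List String) : List (String × Int) :=
  [("parsed_messages", pvCount lines "discord ingress parsed message"),
   ("queue_wait_events", pvCount lines "event=\"discord.ingress.inbound_queue_wait\""),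
   ("foreground_gate_wait_events", pvCount lines "event=\"discord.foreground.gate_wait\""),
   ("inbound_queue_unavailable_events", pvCount lines "discord inbound queue unavailable")]

-- ===== PORT B =====
def pvStep (s : Int × Int × Int × Int) (line : String) : Int × Int × Int × Int :=
  ((if PySem.Str.isIn "discord ingress parsed message" line then s.1 + 1 else s.1),
   (if PySem.Str.isIn "event=\"discord.ingress.inbound_queue_wait\"" line then s.2.1 + 1 else s.2.1),
   (if PySem.Str.isIn "event=\"discord.foreground.gate_wait\"" line then s.2.2.1 + 1 else s.2.2.1),
   (if PySem.Str.isIn "discord inbound queue unavailable" line then s.2.2.2 + 1 else s.2.2.2))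

def collect_log_stats_alt (lines : List String) : List (String × Int) :=
  let s := lines.foldl pvStep (0, 0, 0, 0)
  [("parsed_messages", s.1),
   ("queue_wait_events", s.2.1),
   ("foreground_gate_wait_events", s.2.2.1),
   ("inbound_queue_unavailable_events", s.2.2.2)]

-- ===== PRECONDITION & SPEC =====
def Spec_collect_log_stats (lines : List String) (out : List (String × Int)) : Prop := out = collect_log_stats_alt lines
instance (lines : List String) (out : List (String × Int)) : Decidable (Spec_collect_log_stats lines out) := by unfold Spec_collect_log_stats; infer_instance

-- ===== CLAIM (what is proved, stated in full; the proofs are below) =====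
def Claim_equal_collect_log_stats : Prop := ∀ (lines : List String), Dom_collect_log_stats lines → Spec_collect_log_stats lines (collect_log_stats lines)

-- ===== LEMMAS AND PROOFS =====
theorem pvCount_shift (tok : String) (ls : List String) (a : Int) :
    ls.foldl (fun acc l => if PySem.Str.isIn tok l then acc + 1 else acc) a
      = a + pvCount ls tok := by
  induction ls generalizing a with
  | nil => simp [pvCount]
  | cons l ls ih =>
    simp only [pvCount, List.foldl_cons] at *
    rw [ih, ih (if PySem.Str.isIn tok l then (0:Int) + 1 else 0)]
    split_ifs <;> ring

theorem pvStep_fused (ls : List String) (a b c d : Int) :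
    ls.foldl pvStep (a, b, c, d)
      = (a + pvCount ls "discord ingress parsed message",
         b + pvCount ls "event=\"discord.ingress.inbound_queue_wait\"",
         c + pvCount ls "event=\"discord.foreground.gate_wait\"",
         d + pvCount ls "discord inbound queue unavailable") := by
  induction ls generalizing a b c d with
  | nil => simp [pvCount]
  | cons l ls ih =>
    have h : ∀ tok, pvCount (l :: ls) tok
        = (if PySem.Str.isIn tok l then (1:Int) else 0) + pvCount ls tok := by
      intro tok
      simp only [pvCount, List.foldl_cons]
      rw [pvCount_shift]
      simp only [pvCount]
      split_ifs <;> ring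
    rw [List.foldl_cons, ih, h, h, h, h]
    simp only [pvStep, Prod.mk.injEq]
    refine ⟨?_, ?_, ?_, ?_⟩ <;> split_ifs <;> ring

-- ===== VERDICT (by name: the statement is the Claim_ definition above) =====
theorem collect_log_stats_spec : Claim_equal_collect_log_stats := by
  intro lines _
  unfold Spec_collect_log_stats collect_log_stats collect_log_stats_alt
  rw [pvStep_fused]
  simp
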